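-- pv_equiv track=rewrite | github.com/cidpCvLab/qiandao | getData.py | cal_time_length
-- ===== SOURCE A (Python) =====
-- def cal_time_length(time_list):
--     time_length_day = []
--     if len(time_list) % 2 == 0:
--         for t in range(len(time_list))[1::2]:
--             time_length_day.append(time_list[t] - time_list[t-1])
--     else:
--         for t in range(len(time_list))[1:]:
--             time_length_day.append(time_list[t] - time_list[t-1])
--         time_length_day = sorted(time_length_day)[:int((len(time_list)-1)/2)]
--     return sum(time_length_day)
-- ===== SOURCE B (Python) =====
-- def cal_time_length(time_list):
--     n = len(time_list)
--     if n % 2 == 0: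
--         total = 0
--         sign = -1
--         for x in time_list:
--             total += sign * x
--             sign = -sign
--         return total
--     diffs = [b - a for a, b in zip(time_list, time_list[1:])]
--     return _sum_k_smallest(diffs, (n - 1) // 2)
--
--
-- def _sum_k_smallest(xs, k):
--     """Sum of the k smallest elements of xs, by iterative quickselect partitioning."""
--     total = 0
--     while True:
--         if k <= 0:
--             return total
--         if len(xs) <= k:
--             return total + sum(xs)
--         pivot = xs[0]
--         less = [x for x in xs if x < pivot]
--         greater = [x for x in xs if x > pivot]
--         n_le = len(xs) - len(greater)
--         if k <= len(less):
--             xs = less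
--         elif k <= n_le:
--             return total + sum(less) + pivot * (k - len(less))
--         else:
--             total += sum(less) + pivot * (n_le - len(less))
--             xs = greater
--             k -= n_le
-- ===== Notes on version B (the rewrite author's own statement) =====
-- stated objective: alternative
-- what changed: Even-length case: one alternating-sign pass over the list instead of building a list of pair differences by index; odd-length case: the sum of the (n-1)/2 smallest consecutive differences is found by iterative quickselect three-way partitioning instead of fully sorting the differences and slicing.
import Mathlib
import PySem

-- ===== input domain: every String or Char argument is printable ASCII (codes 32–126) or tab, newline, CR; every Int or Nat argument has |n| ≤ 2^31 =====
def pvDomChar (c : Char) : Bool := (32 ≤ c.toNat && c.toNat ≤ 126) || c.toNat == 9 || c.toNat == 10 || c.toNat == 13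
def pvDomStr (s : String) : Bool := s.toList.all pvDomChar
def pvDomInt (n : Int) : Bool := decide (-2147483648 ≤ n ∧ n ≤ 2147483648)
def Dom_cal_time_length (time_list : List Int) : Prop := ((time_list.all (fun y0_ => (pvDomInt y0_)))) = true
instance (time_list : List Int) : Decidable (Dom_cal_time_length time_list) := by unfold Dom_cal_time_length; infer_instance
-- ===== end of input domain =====

-- B replaces A's index-pairing loop by a single alternating-sign pass (even case) and A's
-- sort-then-slice of the consecutive differences by an iterative quickselect partition (odd case).

-- ===== PORT A =====
-- range(len(time_list))[1::2] is range(1, n, 2) and range(len(time_list))[1:] is range(1, n, 1);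
-- indices t and t-1 are always in range, so pyGetD is exact; len % 2 on a Nat length is exact for
-- Python's %, and int((n-1)/2) on odd n ≥ 1 equals floor division.
def cal_time_length (time_list : List Int) : Int :=
  let n : Int := time_list.length
  if time_list.length % 2 = 0 then
    let day := (PySem.List.pyRange 1 n 2).foldl
      (fun acc t => acc ++ [PySem.List.pyGetD time_list t 0 - PySem.List.pyGetD time_list (t - 1) 0]) []
    day.sum
  else
    let day := (PySem.List.pyRange 1 n 1).foldl
      (fun acc t => acc ++ [PySem.List.pyGetD time_list t 0 - PySem.List.pyGetD time_list (t - 1) 0]) []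
    let day2 := PySem.List.slice (PySem.List.sorted day (fun x => x)) none
      (some (PySem.Int.floordiv (n - 1) 2))
    day2.sum

-- ===== PORT B =====
-- transliteration of Source B: `lessOf`/`greaterOf` name the two comprehensions of `_sum_k_smallest`
-- (pivot = xs[0] = headD, sound because the loop body only runs on a nonempty xs), and
-- `sumKSmallestLoop` is its while-loop as recursion on the shrinking list
def lessOf (xs : List Int) : List Int := xs.filter (fun x => decide (x < xs.headD 0))
def greaterOf (xs : List Int) : List Int := xs.filter (fun x => decide (xs.headD 0 < x))

theorem lessOf_lt (xs : List Int) (h : xs ≠ []) : (lessOf xs).length < xs.length :=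
  List.length_filter_lt_length_iff_exists.mpr
    ⟨xs.headD 0, by cases xs with | nil => exact absurd rfl h | cons a t => simp, by simp⟩

theorem greaterOf_lt (xs : List Int) (h : xs ≠ []) : (greaterOf xs).length < xs.length :=
  List.length_filter_lt_length_iff_exists.mpr
    ⟨xs.headD 0, by cases xs with | nil => exact absurd rfl h | cons a t => simp, by simp⟩

def sumKSmallestLoop (xs : List Int) (k : Int) (total : Int) : Int :=
  if k ≤ 0 then total
  else if _hl : (xs.length : Int) ≤ k then total + xs.sum
  else
    let pivot := xs.headD 0
    let less := lessOf xs
    let greater := greaterOf xs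
    let nLe : Int := (xs.length : Int) - greater.length
    if k ≤ (less.length : Int) then sumKSmallestLoop less k total
    else if k ≤ nLe then total + less.sum + pivot * (k - less.length)
    else sumKSmallestLoop greater (k - nLe) (total + (less.sum + pivot * (nLe - less.length)))
termination_by xs.length
decreasing_by
  · exact lessOf_lt xs (by rintro rfl; simp at _hl; omega)
  · exact greaterOf_lt xs (by rintro rfl; simp at _hl; omega)

def cal_time_length_alt (time_list : List Int) : Int :=
  let n := time_list.length
  if n % 2 = 0 then
    (time_list.foldl (fun (st : Int × Int) x => (st.1 + st.2 * x, -st.2)) (0, -1)).1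
  else
    let diffs := (time_list.zip time_list.tail).map (fun p => p.2 - p.1)
    sumKSmallestLoop diffs (PySem.Int.floordiv ((n : Int) - 1) 2) 0

-- ===== PRECONDITION & SPEC =====
def Spec_cal_time_length (time_list : List Int) (out : Int) : Prop := out = cal_time_length_alt time_list
instance (time_list : List Int) (out : Int) : Decidable (Spec_cal_time_length time_list out) := by unfold Spec_cal_time_length; infer_instance

-- ===== CLAIM (what is proved, stated in full; the proofs are below) =====
def Claim_equal_cal_time_length : Prop := ∀ (time_list : List Int), Dom_cal_time_length time_list → Spec_cal_time_length time_list (cal_time_length time_list)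

-- ===== LEMMAS AND PROOFS =====

-- the consecutive-difference value both branches reduce to
def diffAt (xs : List Int) (k : Nat) : Int := xs.getD (k + 1) 0 - xs.getD k 0

theorem zip_diffs_eq : ∀ (xs : List Int),
    (xs.zip xs.tail).map (fun p => p.2 - p.1) = (List.range (xs.length - 1)).map (diffAt xs)
  | [] => by simp
  | [a] => by simp
  | a :: b :: rest => by
    have ih := zip_diffs_eq (b :: rest)
    simp only [List.tail_cons, List.zip_cons_cons, List.map_cons] at ih ⊢
    rw [ih]
    have : (a :: b :: rest).length - 1 = (b :: rest).length - 1 + 1 := by simp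
    rw [this, List.range_succ_eq_map, List.map_cons, List.map_map]
    rfl

theorem even_sum_eq : ∀ (xs : List Int), xs.length % 2 = 0 → ∀ (c : Int),
    (xs.foldl (fun (st : Int × Int) x => (st.1 + st.2 * x, -st.2)) (c, -1)).1
      = c + ((List.range (xs.length / 2)).map (fun k => diffAt xs (2 * k))).sum
  | [], _, c => by simp
  | [a], h, c => by simp at h
  | a :: b :: rest, h, c => by
    have ih := even_sum_eq rest (by simp at h; omega) (c + -1 * a + - -1 * b)
    simp only [List.foldl_cons, neg_neg] at ih ⊢
    rw [ih]
    have : (a :: b :: rest).length / 2 = rest.length / 2 + 1 := by simp; omega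
    rw [this, List.range_succ_eq_map, List.map_cons, List.map_map]
    have h2 : ∀ k : Nat, diffAt (a :: b :: rest) (2 * Nat.succ k) = diffAt rest (2 * k) := by
      intro k; simp [diffAt, Nat.mul_succ, List.getD]
    simp only [Function.comp_def, h2]
    simp [diffAt]
    ring

theorem a_even_eq (xs : List Int) :
    ((PySem.List.pyRange 1 (xs.length : Int) 2).map
        (fun t => PySem.List.pyGetD xs t 0 - PySem.List.pyGetD xs (t - 1) 0)).sum
      = ((List.range (xs.length / 2)).map (fun k => diffAt xs (2 * k))).sum := by
  rw [PySem.List.pyRange_of_pos 1 (xs.length : Int) (by norm_num), List.map_map]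
  have hm : (if (1:Int) < (xs.length : Int) then (((xs.length : Int) - 1 + 2 - 1) / 2).toNat else 0)
      = xs.length / 2 := by
    split_ifs with h
    · have : ((xs.length : Int) - 1 + 2 - 1) = ((xs.length : Nat) : Int) := by ring
      rw [this]
      omega
    · omega
  rw [hm]
  refine congrArg List.sum (List.map_congr_left ?_)
  intro k _
  show PySem.List.pyGetD xs (1 + 2*(k:Int)) 0 - PySem.List.pyGetD xs ((1 + 2*(k:Int)) - 1) 0
      = diffAt xs (2 * k)
  rw [show (1 + 2*(k:Int)) - 1 = ((2*k : Nat) : Int) by push_cast; ring]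
  rw [show (1 + 2*(k:Int)) = ((2*k+1 : Nat) : Int) by push_cast; ring]
  rw [PySem.List.pyGetD_natCast, PySem.List.pyGetD_natCast]
  simp [diffAt, List.getD]

theorem a_odd_day_eq (xs : List Int) :
    (PySem.List.pyRange 1 (xs.length : Int) 1).map
        (fun t => PySem.List.pyGetD xs t 0 - PySem.List.pyGetD xs (t - 1) 0)
      = (List.range (xs.length - 1)).map (diffAt xs) := by
  rw [PySem.List.pyRange_one, List.map_map]
  have hm : ((xs.length : Int) - 1).toNat = xs.length - 1 := by omega
  rw [hm]
  refine List.map_congr_left ?_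
  intro k _
  show PySem.List.pyGetD xs (1 + (k:Int)) 0 - PySem.List.pyGetD xs ((1 + (k:Int)) - 1) 0
      = diffAt xs k
  rw [show (1 + (k:Int)) - 1 = ((k : Nat) : Int) by omega]
  rw [show (1 + (k:Int)) = ((k+1 : Nat) : Int) by push_cast; ring]
  rw [PySem.List.pyGetD_natCast, PySem.List.pyGetD_natCast]
  simp [diffAt, List.getD]

theorem sorted_partition (xs : List Int) (p : Int) :
    PySem.List.sorted xs (fun x => x)
      = PySem.List.sorted (xs.filter (fun x => decide (x < p))) (fun x => x)
          ++ xs.filter (fun x => decide (x = p))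
          ++ PySem.List.sorted (xs.filter (fun x => decide (p < x))) (fun x => x) := by
  apply PySem.List.sorted_id_eq_of_perm_of_pairwise
  · have h1 : ((xs.filter (fun x => decide (x < p))) ++ xs.filter (fun x => !decide (x < p))).Perm xs :=
      List.filter_append_perm _ xs
    have h2 : ((xs.filter (fun x => !decide (x < p))).filter (fun x => decide (x = p))
        ++ (xs.filter (fun x => !decide (x < p))).filter (fun x => !decide (x = p))).Perm
          (xs.filter (fun x => !decide (x < p))) :=
      List.filter_append_perm _ _
    have e1 : (xs.filter (fun x => !decide (x < p))).filter (fun x => decide (x = p))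
        = xs.filter (fun x => decide (x = p)) := by
      rw [List.filter_filter]
      apply List.filter_congr
      intro x _
      by_cases h : x = p <;> simp [h]
    have e2 : (xs.filter (fun x => !decide (x < p))).filter (fun x => !decide (x = p))
        = xs.filter (fun x => decide (p < x)) := by
      rw [List.filter_filter]
      apply List.filter_congr
      intro x _
      by_cases h1 : x < p <;> by_cases h2 : x = p <;> simp [h1, h2] <;> omega
    rw [e1, e2] at h2
    rw [List.append_assoc]
    have A1 : (PySem.List.sorted (xs.filter (fun x => decide (x < p))) (fun x => x)
        ++ (xs.filter (fun x => decide (x = p))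
            ++ PySem.List.sorted (xs.filter (fun x => decide (p < x))) (fun x => x))).Perm
        (xs.filter (fun x => decide (x < p))
          ++ (xs.filter (fun x => decide (x = p)) ++ xs.filter (fun x => decide (p < x)))) :=
      (PySem.List.sorted_perm _ _ _).append
        ((List.Perm.refl _).append (PySem.List.sorted_perm _ _ _))
    exact A1.trans (((List.Perm.refl _).append h2).trans h1)
  · rw [List.append_assoc, List.pairwise_append, List.pairwise_append]
    refine ⟨by simpa using PySem.List.sorted_pairwise (xs.filter (fun x => decide (x < p))) (fun x => x),
      ⟨?_, by simpa using PySem.List.sorted_pairwise (xs.filter (fun x => decide (p < x))) (fun x => x), ?_⟩, ?_⟩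
    · apply List.pairwise_of_forall_mem_list
      intro a ha b hb
      simp at ha hb
      omega
    · intro a ha b hb
      simp at ha
      rw [PySem.List.mem_sorted] at hb
      simp at hb
      omega
    · intro a ha b hb
      rw [PySem.List.mem_sorted] at ha
      simp at ha
      rcases (List.mem_append.mp hb) with h | h
      · simp at h
        omega
      · rw [PySem.List.mem_sorted] at h
        simp at h
        omega

def eqOf (xs : List Int) : List Int := xs.filter (fun x => decide (x = xs.headD 0))

theorem sorted_partition' (xs : List Int) :
    PySem.List.sorted xs (fun x => x)
      = PySem.List.sorted (lessOf xs) (fun x => x) ++ eqOf xs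
          ++ PySem.List.sorted (greaterOf xs) (fun x => x) :=
  sorted_partition xs (xs.headD 0)

theorem eqOf_replicate (xs : List Int) : eqOf xs = List.replicate (eqOf xs).length (xs.headD 0) :=
  List.eq_replicate_of_mem (by intro b hb; rw [eqOf, List.mem_filter] at hb; exact of_decide_eq_true hb.2)

theorem len_split (xs : List Int) :
    (lessOf xs).length + (eqOf xs).length + (greaterOf xs).length = xs.length := by
  have h := congrArg List.length (sorted_partition' xs)
  simp [PySem.List.length_sorted] at h
  omega

theorem take_three {A B C : List Int} {t : Nat} (h : A.length + B.length ≤ t) :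
    List.take t (A ++ B ++ C) = A ++ B ++ List.take (t - A.length - B.length) C := by
  rw [List.take_append, List.take_of_length_le (by simp; omega)]
  simp [Nat.sub_sub]

theorem sumKSmallestLoop_eq (xs : List Int) (k total : Int) :
    sumKSmallestLoop xs k total
      = total + ((PySem.List.sorted xs (fun x => x)).take k.toNat).sum := by
  by_cases hk : k ≤ 0
  · rw [sumKSmallestLoop, if_pos hk]
    have h0 : k.toNat = 0 := by omega
    simp [h0]
  · by_cases hl : (xs.length : Int) ≤ k
    · rw [sumKSmallestLoop, if_neg hk, dif_pos hl]
      rw [List.take_of_length_le (by rw [PySem.List.length_sorted]; omega),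
        (PySem.List.sorted_perm xs (fun x => x) false).sum_eq]
    · have hne : xs ≠ [] := by rintro rfl; simp at hl; omega
      have hsplit := len_split xs
      rw [sumKSmallestLoop, if_neg hk, dif_neg hl]
      simp only
      rw [sorted_partition' xs]
      by_cases h1 : k ≤ ((lessOf xs).length : Int)
      · rw [if_pos h1, sumKSmallestLoop_eq (lessOf xs) k total]
        rw [List.append_assoc, List.take_append_of_le_length
          (by rw [PySem.List.length_sorted]; omega)]
      · rw [if_neg h1]
        by_cases h2 : k ≤ (xs.length : Int) - ((greaterOf xs).length : Int)
        · rw [if_pos h2]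
          rw [List.take_append_of_le_length
            (by simp [PySem.List.length_sorted]; omega)]
          rw [List.take_append, List.take_of_length_le (by rw [PySem.List.length_sorted]; omega)]
          rw [eqOf_replicate xs, List.take_replicate, List.sum_append, List.sum_replicate,
            (PySem.List.sorted_perm (lessOf xs) (fun x => x) false).sum_eq]
          have hmin : min (k.toNat - (PySem.List.sorted (lessOf xs) (fun x => x)).length)
              (eqOf xs).length
              = k.toNat - (lessOf xs).length := by
            rw [PySem.List.length_sorted]; omega
          rw [hmin]
          have : ((k.toNat - (lessOf xs).length : Nat) : Int) = k - (lessOf xs).length := by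
            omega
          rw [nsmul_eq_mul, this]
          ring
        · rw [if_neg h2]
          rw [sumKSmallestLoop_eq (greaterOf xs) (k - ((xs.length : Int) - ((greaterOf xs).length : Int)))]
          rw [take_three (by rw [PySem.List.length_sorted]; omega)]
          rw [List.sum_append, List.sum_append,
            (PySem.List.sorted_perm (lessOf xs) (fun x => x) false).sum_eq]
          have hE : (eqOf xs).sum = ((eqOf xs).length : Int) * (xs.headD 0) := by
            rw [eqOf_replicate xs, List.sum_replicate, nsmul_eq_mul]
            simp
          have hidx : k.toNat - (PySem.List.sorted (lessOf xs) (fun x => x)).length - (eqOf xs).length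
              = (k - ((xs.length : Int) - ((greaterOf xs).length : Int))).toNat := by
            rw [PySem.List.length_sorted]; omega
          have e3 : ((xs.length : Int) - ((greaterOf xs).length : Int)) - ((lessOf xs).length : Int)
              = ((eqOf xs).length : Int) := by omega
          rw [hidx, hE, e3]
          ring
termination_by xs.length
decreasing_by
  · exact lessOf_lt xs hne
  · exact greaterOf_lt xs hne

-- ===== VERDICT (by name: the statement is the Claim_ definition above) =====
theorem cal_time_length_spec : Claim_equal_cal_time_length := by
  intro xs _
  unfold Spec_cal_time_length cal_time_length cal_time_length_alt
  by_cases h : xs.length % 2 = 0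
  · simp only [h, PySem.List.foldl_append_singleton_eq_map, List.nil_append]
    rw [a_even_eq, even_sum_eq xs h 0]
    simp
  · simp only [h, PySem.List.foldl_append_singleton_eq_map, List.nil_append]
    rw [a_odd_day_eq, sumKSmallestLoop_eq, zip_diffs_eq]
    have hfd : 0 ≤ PySem.Int.floordiv ((xs.length : Int) - 1) 2 := by
      have hlen : 1 ≤ xs.length := by omega
      have : (0:Int) ≤ (xs.length : Int) - 1 := by omega
      exact Int.fdiv_nonneg this (by norm_num)
    rw [PySem.List.slice_to _ hfd]
    simp
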